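-- pv_equiv track=rewrite | github.com/Jiseoup/python-coding-test | High-Score-Kit/Stack-Queue/function.py | solution
-- ===== SOURCE A (Python) =====
-- from collections import deque
--
-- def solution(progresses, speeds):
--     """ My Solution : Using deque() """
--     answer = []
--
--     # Make progresses and speeds into deque.
--     queue = deque(zip(progresses, speeds))
--
--     # Loop until queue is empty.
--     while (queue):
--         # Add speed to the progress.
--         queue = deque([(progress + speed, speed) for progress, speed in queue])
--
--         count = 0
--         while (queue and queue[0][0] >= 100):
--             queue.popleft()
--             count += 1
--
--         if count > 0:
--             answer.append(count)
--
--     return answer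
-- ===== SOURCE B (Python) =====
-- def solution(progresses, speeds):
--     """Closed-form: each task's finish day is ceil((100-p)/s) (at least 1);
--     tasks deploy together while their running-max finish day is unchanged."""
--     answer = []
--     cur_max = 0
--     count = 0
--     for p, s in zip(progresses, speeds):
--         d = -((p - 100) // s)  # ceil((100 - p) / s)
--         if d < 1:
--             d = 1
--         if d > cur_max:
--             if count:
--                 answer.append(count)
--             cur_max = d
--             count = 1
--         else:
--             count += 1
--     if count:
--         answer.append(count)
--     return answer
-- ===== Notes on version B (the rewrite author's own statement) =====
-- stated objective: alternative
-- what changed: Replaces the day-by-day queue simulation (rebuilding the whole queue every day) with a single pass that computes each task's finish day by ceiling division and run-length-encodes the running maximum of those days (one loop over the tasks instead of a loop over days; intended as faster, but a timing run could not confirm a ratio because A timed out where B returned).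
-- outside the precondition, e.g. on solution([100], [0]): A returns [1], B raises ZeroDivisionError
import Mathlib
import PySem

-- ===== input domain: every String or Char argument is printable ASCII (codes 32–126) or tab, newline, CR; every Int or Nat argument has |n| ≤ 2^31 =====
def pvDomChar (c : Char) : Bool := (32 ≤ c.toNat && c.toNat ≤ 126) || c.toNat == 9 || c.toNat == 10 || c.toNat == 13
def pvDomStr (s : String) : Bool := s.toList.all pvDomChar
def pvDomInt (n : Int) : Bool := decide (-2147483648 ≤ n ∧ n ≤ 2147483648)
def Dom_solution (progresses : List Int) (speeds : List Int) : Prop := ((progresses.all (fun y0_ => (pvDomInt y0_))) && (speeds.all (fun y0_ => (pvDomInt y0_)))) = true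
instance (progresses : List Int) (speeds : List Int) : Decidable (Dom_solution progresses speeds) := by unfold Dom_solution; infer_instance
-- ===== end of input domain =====

-- B replaces A's day-by-day queue simulation by a single pass over closed-form finish days
-- (ceiling division + run-length encoding of their running maximum).

-- ===== PORT A =====
-- inner `while queue and queue[0][0] >= 100: popleft; count += 1`
def popLoop : List (Int × Int) → Nat × List (Int × Int)
  | [] => (0, [])
  | x :: rest =>
    if 100 ≤ x.1 then
      let r := popLoop rest
      (r.1 + 1, r.2)
    else (0, x :: rest)

-- outer `while queue:` — `fuel` is only a totality guard (proved sufficient under Pre_)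
def simLoop : Nat → List (Int × Int) → List Int → List Int
  | 0, _, ans => ans
  | fuel + 1, q, ans =>
    if q.isEmpty then ans
    else
      let q1 := q.map (fun x => (x.1 + x.2, x.2))
      let r := popLoop q1
      simLoop fuel r.2 (if 0 < r.1 then ans ++ [(r.1 : Int)] else ans)

def solution (progresses : List Int) (speeds : List Int) : List Int :=
  let q := List.zip progresses speeds
  simLoop (1 + q.foldr (fun x a => a + (100 - x.1).natAbs) 0) q []

-- ===== PORT B =====
-- one loop iteration of Source B: d = max 1 (ceil((100-p)/s)); new group iff d > cur_max
def altStep (st : Int × Int × List Int) (x : Int × Int) : Int × Int × List Int :=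
  let d0 := -(PySem.Int.floordiv (x.1 - 100) x.2)
  let d := if d0 < 1 then 1 else d0
  if st.1 < d then (d, 1, if 0 < st.2.1 then st.2.2 ++ [st.2.1] else st.2.2)
  else (st.1, st.2.1 + 1, st.2.2)

def solution_alt (progresses : List Int) (speeds : List Int) : List Int :=
  let st := (List.zip progresses speeds).foldl altStep (0, 0, [])
  if 0 < st.2.1 then st.2.2 ++ [st.2.1] else st.2.2

-- ===== PRECONDITION & SPEC =====
-- Pre_ excludes nonpositive speeds: with any unfinished task of speed ≤ 0 A loops forever,
-- and where it does return (tasks already ≥ 100 each day) B's ceiling division divides by 0.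
def Pre_solution (progresses : List Int) (speeds : List Int) : Prop :=
  ∀ x ∈ List.zip progresses speeds, 1 ≤ x.2

instance (progresses : List Int) (speeds : List Int) : Decidable (Pre_solution progresses speeds) := by
  unfold Pre_solution; infer_instance

def pvWitness_solution : List Int × List Int := ([93, 30, 55], [1, 30, 5])

def Spec_solution (progresses : List Int) (speeds : List Int) (out : List Int) : Prop := out = solution_alt progresses speeds
instance (progresses : List Int) (speeds : List Int) (out : List Int) : Decidable (Spec_solution progresses speeds out) := by unfold Spec_solution; infer_instance

-- ===== CLAIM (what is proved, stated in full; the proofs are below) =====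
def Claim_equal_solution : Prop := ∀ (progresses : List Int) (speeds : List Int), Dom_solution progresses speeds → Pre_solution progresses speeds → Spec_solution progresses speeds (solution progresses speeds)

-- ===== LEMMAS AND PROOFS =====

-- finish-day "ceiling" of one task: ceil((100 - p) / s)  (A pops (p,s) the day this reaches 0)
def cOf (x : Int × Int) : Int := -(PySem.Int.floordiv (x.1 - 100) x.2)

-- run-length encoding of the running maximum of (max 1 c) over the ceiling list
def refGo : Int → Int → List Int → List Int
  | _, k, [] => [k]
  | m, k, c :: rest => if m < max 1 c then k :: refGo (max 1 c) 1 rest else refGo m (k + 1) rest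

def ref : List Int → List Int
  | [] => []
  | c :: rest => refGo (max 1 c) 1 rest

-- A's simulation abstracted to the ceiling list: decrement all, pop the ≤ 0 prefix
def simC : Nat → List Int → List Int → List Int
  | 0, _, ans => ans
  | f + 1, cs, ans =>
    if cs.isEmpty then ans
    else
      let cs' := cs.map (· - 1)
      let t := (cs'.takeWhile (fun c => decide (c ≤ 0))).length
      simC f (cs'.dropWhile (fun c => decide (c ≤ 0))) (if 0 < t then ans ++ [(t : Int)] else ans)

theorem simC_nil (f : Nat) (ans : List Int) : simC f [] ans = ans := by
  cases f <;> simp [simC]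

theorem popLoop_eq (l : List (Int × Int)) :
    popLoop l = ((l.takeWhile (fun x => decide (100 ≤ x.1))).length,
                 l.dropWhile (fun x => decide (100 ≤ x.1))) := by
  induction l with
  | nil => simp [popLoop]
  | cons x rest ih =>
    by_cases h : 100 ≤ x.1 <;> simp [popLoop, h, ih]

theorem cOf_nonpos_iff (x : Int × Int) (hs : 1 ≤ x.2) : cOf x ≤ 0 ↔ 100 ≤ x.1 := by
  unfold cOf
  have h := PySem.Int.le_floordiv_iff_mul_le (a := x.1 - 100) (b := x.2) (q := 0) (by omega)
  omega

theorem cOf_step (x : Int × Int) (hs : 1 ≤ x.2) : cOf (x.1 + x.2, x.2) = cOf x - 1 := by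
  unfold cOf
  rw [PySem.Int.floordiv_eq_ediv_of_pos (by omega), PySem.Int.floordiv_eq_ediv_of_pos (by omega)]
  have : x.1 + x.2 - 100 = (x.1 - 100) + 1 * x.2 := by ring
  rw [this, Int.add_mul_ediv_right _ _ (by omega : x.2 ≠ 0)]
  ring

theorem tw_dw (q : List (Int × Int)) (hs : ∀ x ∈ q, 1 ≤ x.2) :
    (q.map cOf).takeWhile (fun c => decide (c ≤ 0)) = (q.takeWhile (fun x => decide (100 ≤ x.1))).map cOf ∧
    (q.map cOf).dropWhile (fun c => decide (c ≤ 0)) = (q.dropWhile (fun x => decide (100 ≤ x.1))).map cOf := by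
  induction q with
  | nil => simp
  | cons x rest ih =>
    have hx := cOf_nonpos_iff x (hs x (by simp))
    have ih' := ih (fun y hy => hs y (by simp [hy]))
    by_cases h : 100 ≤ x.1
    · simp [hx.mpr h, h, ih'.1, ih'.2]
    · have : ¬ cOf x ≤ 0 := fun hc => h (hx.mp hc)
      simp [this, h]

theorem sim_corr (f : Nat) : ∀ (q : List (Int × Int)) (ans : List Int),
    (∀ x ∈ q, 1 ≤ x.2) → simLoop f q ans = simC f (q.map cOf) ans := by
  induction f with
  | zero => intro q ans _; simp [simLoop, simC]
  | succ f ih =>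
    intro q ans hs
    by_cases hq : q = []
    · subst hq; simp [simLoop, simC]
    · have hq' : q.isEmpty = false := by simp [hq]
      have hmq : (q.map cOf).isEmpty = false := by simp [hq]
      set q1 := q.map (fun x => (x.1 + x.2, x.2)) with hq1
      have hs1 : ∀ x ∈ q1, 1 ≤ x.2 := by
        intro x hx
        rw [hq1] at hx
        obtain ⟨y, hy, rfl⟩ := List.mem_map.mp hx
        exact hs y hy
      have hmap : (q.map cOf).map (· - 1) = q1.map cOf := by
        rw [hq1, List.map_map, List.map_map]
        apply List.map_congr_left
        intro x hx
        simpa using (cOf_step x (hs x hx)).symm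
      have htd := tw_dw q1 hs1
      rw [simLoop, simC, hq', hmq]
      simp only [popLoop_eq, hmap, htd.1, htd.2, List.length_map]
      exact ih _ _ (fun x hx => hs1 x (List.Sublist.mem hx (List.dropWhile_sublist _)))

theorem refGo_dec (rest : List Int) : ∀ (m k : Int), 2 ≤ m →
    refGo (m - 1) k (rest.map (· - 1)) = refGo m k rest := by
  induction rest with
  | nil => intro m k _; simp [refGo]
  | cons c r ih =>
    intro m k hm
    by_cases hc : c ≤ 1
    · have h1 : max 1 (c - 1) = 1 := by omega
      have h2 : max 1 c = 1 := by omega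
      simp only [List.map_cons, refGo, h1, h2]
      rw [if_neg (by omega), if_neg (by omega)]
      exact ih m (k + 1) hm
    · have h1 : max 1 (c - 1) = c - 1 := by omega
      have h2 : max 1 c = c := by omega
      simp only [List.map_cons, refGo, h1, h2]
      by_cases hmc : m < c
      · rw [if_pos (by omega), if_pos hmc, ih c 1 (by omega)]
      · rw [if_neg (by omega), if_neg hmc]
        exact ih m (k + 1) hm

theorem refGo_prefix (rest : List Int) : ∀ (k : Int),
    refGo 1 k rest = (k + ((rest.takeWhile (fun c => decide (c ≤ 1))).length : Int)) ::
      ref (rest.dropWhile (fun c => decide (c ≤ 1))) := by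
  induction rest with
  | nil => intro k; simp [refGo, ref]
  | cons c r ih =>
    intro k
    by_cases hc : c ≤ 1
    · have h2 : max 1 c = 1 := by omega
      simp only [refGo, h2, List.takeWhile_cons, List.dropWhile_cons]
      rw [if_neg (by omega)]
      rw [ih (k + 1)]
      simp [hc]
      omega
    · have h2 : max 1 c = c := by omega
      simp only [refGo, h2, List.takeWhile_cons, List.dropWhile_cons]
      rw [if_pos (by omega)]
      simp [hc, ref, h2]

theorem dropWhile_head_not_le {r : List Int} {c2 : Int} {r3 : List Int}
    (h : r.dropWhile (fun c => decide (c ≤ 1)) = c2 :: r3) : ¬ c2 ≤ 1 := by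
  have hlen : 0 < (r.dropWhile (fun c => decide (c ≤ 1))).length := by simp [h]
  intro hle
  have h2 := List.dropWhile_get_zero_not (p := fun c => decide (c ≤ 1)) r hlen
  apply h2
  have hg : (r.dropWhile (fun c => decide (c ≤ 1))).get ⟨0, hlen⟩ = c2 := by
    simp [List.get_eq_getElem, h]
  rw [hg]
  simpa using hle

theorem simC_eq_ref (f : Nat) : ∀ (cs : List Int) (ans : List Int),
    (∀ c ∈ cs, max 1 c ≤ (f : Int)) → simC f cs ans = ans ++ ref cs := by
  induction f with
  | zero =>
    intro cs ans h
    cases cs with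
    | nil => simp [simC, ref]
    | cons c r => exact absurd (h c (by simp)) (by push_cast; omega)
  | succ f ih =>
    intro cs ans h
    cases cs with
    | nil => simp [simC, ref]
    | cons c rest =>
      have hc1 : max 1 c ≤ (f : Int) + 1 := by
        have := h c (by simp); push_cast at this ⊢; omega
      have hmapt : (rest.map (· - 1)).takeWhile (fun c => decide (c ≤ 0)) =
          (rest.takeWhile (fun c => decide (c ≤ 1))).map (· - 1) := by
        rw [List.takeWhile_map]
        have hp : ((fun c => decide (c ≤ 0)) ∘ (fun x : Int => x - 1)) = (fun c : Int => decide (c ≤ 1)) := by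
          funext x; simp only [Function.comp_apply, decide_eq_decide]; omega
        rw [hp]
      have hmapd : (rest.map (· - 1)).dropWhile (fun c => decide (c ≤ 0)) =
          (rest.dropWhile (fun c => decide (c ≤ 1))).map (· - 1) := by
        rw [List.dropWhile_map]
        have hp : ((fun c => decide (c ≤ 0)) ∘ (fun x : Int => x - 1)) = (fun c : Int => decide (c ≤ 1)) := by
          funext x; simp only [Function.comp_apply, decide_eq_decide]; omega
        rw [hp]
      rw [simC]
      simp only [List.isEmpty_cons, List.map_cons,
        if_neg (by decide : ¬ (false = true))]
      by_cases hc : c ≤ 1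
      · -- head pops: the first group closes with size 1 + j
        rw [List.takeWhile_cons_of_pos (by simp; omega),
            List.dropWhile_cons_of_pos (by simp; omega)]
        simp only [hmapt, hmapd, List.length_cons, List.length_map]
        rw [if_pos (by omega)]
        set j := (rest.takeWhile (fun c => decide (c ≤ 1))).length with hj
        set r2 := rest.dropWhile (fun c => decide (c ≤ 1)) with hr2
        have hrefc : ref (c :: rest) = ((1 : Int) + (j : Int)) :: ref r2 := by
          have hm : max 1 c = 1 := by omega
          rw [ref, hm, refGo_prefix]
        cases hcase : r2 with
        | nil =>
          rw [List.map_nil, simC_nil, hrefc, hcase]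
          simp only [ref]
          congr 2
          push_cast; ring
        | cons c2 r3 =>
          have hc2 : ¬ c2 ≤ 1 := dropWhile_head_not_le (hr2 ▸ hcase)
          have hmemr2 : ∀ y ∈ r2, y ∈ rest := fun y hy =>
            List.Sublist.mem hy (hr2 ▸ List.dropWhile_sublist _)
          have hfuel : ∀ c' ∈ r2.map (· - 1), max 1 c' ≤ (f : Int) := by
            intro c' hc'
            obtain ⟨y, hy, rfl⟩ := List.mem_map.mp hc'
            have h1 := h y (by simp [hmemr2 y hy])
            have h2 := h c2 (by simp [hmemr2 c2 (by rw [hcase]; simp)])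
            push_cast at h1 h2 ⊢; omega
          rw [← hcase, ih _ _ hfuel]
          have hrefmap : ref (r2.map (· - 1)) = ref r2 := by
            rw [hcase]
            simp only [List.map_cons, ref]
            have h1 : max 1 (c2 - 1) = c2 - 1 := by omega
            have h2 : max 1 c2 = c2 := by omega
            rw [h1, h2]
            exact refGo_dec r3 c2 1 (by omega)
          rw [hrefmap, hrefc]
          simp only [List.append_assoc, List.singleton_append]
          congr 2
          push_cast; ring
      · -- nothing finishes today: decrement everything and recurse
        rw [List.takeWhile_cons_of_neg (by simp; omega),
            List.dropWhile_cons_of_neg (by simp; omega)]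
        simp only [List.length_nil]
        rw [if_neg (by omega)]
        have hfuel : ∀ c' ∈ (c - 1) :: rest.map (· - 1), max 1 c' ≤ (f : Int) := by
          intro c' hc'
          rcases List.mem_cons.mp hc' with rfl | hmem
          · push_cast at hc1 ⊢; omega
          · obtain ⟨y, hy, rfl⟩ := List.mem_map.mp hmem
            have := h y (by simp [hy])
            push_cast at this ⊢; omega
        rw [ih _ _ hfuel]
        have hr : ref ((c - 1) :: rest.map (· - 1)) = ref (c :: rest) := by
          simp only [ref]
          have h1 : max 1 (c - 1) = c - 1 := by omega
          have h2 : max 1 c = c := by omega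
          rw [h1, h2]
          exact refGo_dec rest c 1 (by omega)
        rw [hr]

theorem alt_fold (q : List (Int × Int)) : ∀ (m k : Int) (ans : List Int), 1 ≤ k →
    (if 0 < (q.foldl altStep (m, k, ans)).2.1
     then (q.foldl altStep (m, k, ans)).2.2 ++ [(q.foldl altStep (m, k, ans)).2.1]
     else (q.foldl altStep (m, k, ans)).2.2) = ans ++ refGo m k (q.map cOf) := by
  induction q with
  | nil =>
    intro m k ans hk
    simp only [List.foldl_nil, List.map_nil, refGo]
    rw [if_pos (by omega)]
  | cons x r ih =>
    intro m k ans hk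
    have hd : (if -(PySem.Int.floordiv (x.1 - 100) x.2) < 1 then (1 : Int)
        else -(PySem.Int.floordiv (x.1 - 100) x.2)) = max 1 (cOf x) := by
      unfold cOf; omega
    have hstep_pos : m < max 1 (cOf x) → altStep (m, k, ans) x = (max 1 (cOf x), 1, ans ++ [k]) := by
      intro hlt
      simp only [altStep, hd]
      rw [if_pos hlt, if_pos (by omega)]
    have hstep_neg : ¬ m < max 1 (cOf x) → altStep (m, k, ans) x = (m, k + 1, ans) := by
      intro hlt
      simp only [altStep, hd]
      rw [if_neg hlt]
    simp only [List.foldl_cons, List.map_cons, refGo]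
    by_cases hlt : m < max 1 (cOf x)
    · rw [if_pos hlt, hstep_pos hlt, ih (max 1 (cOf x)) 1 (ans ++ [k]) (by omega)]
      simp
    · rw [if_neg hlt, hstep_neg hlt]
      exact ih m (k + 1) ans (by omega)

theorem alt_eq_ref (progresses : List Int) (speeds : List Int) :
    solution_alt progresses speeds = ref ((List.zip progresses speeds).map cOf) := by
  unfold solution_alt
  cases hz : List.zip progresses speeds with
  | nil => simp [ref]
  | cons x r =>
    simp only [List.foldl_cons, List.map_cons, ref]
    have hd : (if -(PySem.Int.floordiv (x.1 - 100) x.2) < 1 then (1 : Int)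
        else -(PySem.Int.floordiv (x.1 - 100) x.2)) = max 1 (cOf x) := by
      unfold cOf; omega
    have h0 : altStep (0, 0, []) x = (max 1 (cOf x), 1, []) := by
      simp only [altStep, hd]
      rw [if_pos (by omega)]
      simp
    rw [h0]
    simpa using alt_fold r (max 1 (cOf x)) 1 [] (by omega)

theorem fuel_term_mem (l : List (Int × Int)) (x : Int × Int) (hx : x ∈ l) :
    (100 - x.1).natAbs ≤ l.foldr (fun y a => a + (100 - y.1).natAbs) 0 := by
  induction l with
  | nil => simp at hx
  | cons y r ih =>
    simp only [List.foldr_cons]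
    rcases List.mem_cons.mp hx with rfl | hm
    · omega
    · have := ih hm; omega

theorem cOf_le_fuel (q : List (Int × Int)) (hs : ∀ x ∈ q, 1 ≤ x.2) :
    ∀ c ∈ q.map cOf, max 1 c ≤ ((1 + q.foldr (fun y a => a + (100 - y.1).natAbs) 0 : Nat) : Int) := by
  intro c hc
  obtain ⟨x, hx, rfl⟩ := List.mem_map.mp hc
  have hsx := hs x hx
  have hbound : cOf x ≤ (100 - x.1).natAbs := by
    unfold cOf
    by_cases hp : x.1 - 100 ≥ 0
    · have h0 : 0 ≤ PySem.Int.floordiv (x.1 - 100) x.2 :=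
        (PySem.Int.le_floordiv_iff_mul_le (by omega)).mpr (by omega)
      omega
    · have hle : -(100 - x.1) ≤ PySem.Int.floordiv (x.1 - 100) x.2 := by
        rw [PySem.Int.le_floordiv_iff_mul_le (by omega)]
        have h1 : (1 : Int) ≤ 100 - x.1 := by omega
        nlinarith
      omega
  have hsum := fuel_term_mem q x hx
  have : ((100 - x.1).natAbs : Int) ≤ (q.foldr (fun y a => a + (100 - y.1).natAbs) 0 : Nat) := by
    exact_mod_cast hsum
  push_cast
  omega

-- ===== VERDICT (by name: the statement is the Claim_ definition above) =====
theorem solution_spec : Claim_equal_solution := by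
  intro progresses speeds _ hpre
  unfold Spec_solution solution
  rw [sim_corr _ _ _ hpre, alt_eq_ref,
      simC_eq_ref _ _ _ (cOf_le_fuel _ hpre)]
  simp
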